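-- pv_equiv track=rewrite | github.com/PedroLauand/EvansScenario | Indices.py | evansAmarginalA4
-- ===== SOURCE A (Python) =====
-- def evansAmarginalA4(a0,a1):
--     #Index for Alice's marginal  joint distribution q(a0,a1) for evans scenario where |A|=3.
--     i=0
--     for A1 in range(4):
--         for A0 in range(4):
--             if A1==a1 and A0==a0 :
--                 return i
--             else :
--                 i=i+1
-- ===== SOURCE B (Python) =====
-- def evansAmarginalA4(a0, a1):
--     # Closed form: row-major index a1*4 + a0; None outside the 4x4 grid,
--     # matching the counter loop's implicit None for non-matches.
--     if a0 in range(4) and a1 in range(4):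
--         return int(a1) * 4 + int(a0)
--     return None
-- ===== Notes on version B (the rewrite author's own statement) =====
-- stated objective: simpler
-- what changed: Replaces the nested counter loop over the 4x4 grid with a range check and the closed-form index a1*4 + a0.
import Mathlib
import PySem

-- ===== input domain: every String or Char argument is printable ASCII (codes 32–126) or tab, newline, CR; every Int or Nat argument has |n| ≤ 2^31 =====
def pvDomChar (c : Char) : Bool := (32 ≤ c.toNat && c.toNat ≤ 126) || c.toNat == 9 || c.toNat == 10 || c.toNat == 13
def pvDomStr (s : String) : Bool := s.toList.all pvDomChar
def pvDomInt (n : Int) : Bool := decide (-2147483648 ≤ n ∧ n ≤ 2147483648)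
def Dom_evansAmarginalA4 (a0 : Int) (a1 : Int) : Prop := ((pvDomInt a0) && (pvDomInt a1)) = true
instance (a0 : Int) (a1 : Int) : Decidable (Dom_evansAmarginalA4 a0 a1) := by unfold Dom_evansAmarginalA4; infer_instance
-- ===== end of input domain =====

-- B replaces A's nested counter loop with a range check and the closed form a1*4 + a0 (objective: simpler).

-- ===== PORT A =====
-- inner 'for A0 in range(4)' loop: returns (some i) on the early return, else the final counter
def evA_inner (a0 : Int) (a1 : Int) (A1 : Int) (l : List Int) (i : Int) : Option Int × Int :=
  match l with
  | [] => (none, i)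
  | A0 :: rest =>
    if A1 == a1 && A0 == a0 then (some i, i)
    else evA_inner a0 a1 A1 rest (i + 1)

-- outer 'for A1 in range(4)' loop
def evA_outer (a0 : Int) (a1 : Int) (l : List Int) (i : Int) : Option Int :=
  match l with
  | [] => none
  | A1 :: rest =>
    match evA_inner a0 a1 A1 (PySem.List.pyRange 0 4 1) i with
    | (some r, _) => some r
    | (none, i') => evA_outer a0 a1 rest i'

def evansAmarginalA4 (a0 : Int) (a1 : Int) : Option Int :=
  evA_outer a0 a1 (PySem.List.pyRange 0 4 1) 0

-- ===== PORT B =====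
def evansAmarginalA4_alt (a0 : Int) (a1 : Int) : Option Int :=
  if 0 ≤ a0 ∧ a0 < 4 ∧ 0 ≤ a1 ∧ a1 < 4 then some (a1 * 4 + a0) else none

-- ===== PRECONDITION & SPEC =====
def Spec_evansAmarginalA4 (a0 : Int) (a1 : Int) (out : Option Int) : Prop := out = evansAmarginalA4_alt a0 a1
instance (a0 : Int) (a1 : Int) (out : Option Int) : Decidable (Spec_evansAmarginalA4 a0 a1 out) := by unfold Spec_evansAmarginalA4; infer_instance

-- ===== CLAIM (what is proved, stated in full; the proofs are below) =====
def Claim_equal_evansAmarginalA4 : Prop := ∀ (a0 : Int) (a1 : Int), Dom_evansAmarginalA4 a0 a1 → Spec_evansAmarginalA4 a0 a1 (evansAmarginalA4 a0 a1)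

-- ===== LEMMAS AND PROOFS =====
theorem evA_inner_none (a0 a1 A1 : Int) (l : List Int) (i : Int)
    (h : A1 ≠ a1 ∨ ∀ x ∈ l, x ≠ a0) :
    (evA_inner a0 a1 A1 l i).1 = none := by
  induction l generalizing i with
  | nil => rfl
  | cons x r ih =>
    have hc : (A1 == a1 && x == a0) = false := by
      rcases h with h | h
      · simp [h]
      · simp [h x (by simp)]
    simp only [evA_inner, hc]
    refine ih _ ?_
    rcases h with h | h
    · exact Or.inl h
    · exact Or.inr fun y hy => h y (List.mem_cons_of_mem _ hy)

theorem evA_outer_none (a0 a1 : Int) (l : List Int) (i : Int)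
    (h : (∀ A1 ∈ l, A1 ≠ a1) ∨ ∀ x ∈ PySem.List.pyRange 0 4 1, x ≠ a0) :
    evA_outer a0 a1 l i = none := by
  induction l generalizing i with
  | nil => rfl
  | cons A1 rest ih =>
    have hin : (evA_inner a0 a1 A1 (PySem.List.pyRange 0 4 1) i).1 = none := by
      apply evA_inner_none
      rcases h with h | h
      · exact Or.inl (h A1 (by simp))
      · exact Or.inr h
    simp only [evA_outer]
    cases hv : evA_inner a0 a1 A1 (PySem.List.pyRange 0 4 1) i with
    | mk f s =>
      rw [hv] at hin; simp only at hin; subst hin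
      refine ih _ ?_
      rcases h with h | h
      · exact Or.inl fun y hy => h y (List.mem_cons_of_mem _ hy)
      · exact Or.inr h

theorem evansAmarginalA4_eq (a0 a1 : Int) : evansAmarginalA4 a0 a1 = evansAmarginalA4_alt a0 a1 := by
  have hr : PySem.List.pyRange 0 4 1 = [0, 1, 2, 3] := by decide
  by_cases h : 0 ≤ a0 ∧ a0 < 4 ∧ 0 ≤ a1 ∧ a1 < 4
  · obtain ⟨h0, h1, h2, h3⟩ := h
    interval_cases a0 <;> interval_cases a1 <;> decide
  · have halt : evansAmarginalA4_alt a0 a1 = none := by simp [evansAmarginalA4_alt, h]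
    rw [halt]
    unfold evansAmarginalA4
    apply evA_outer_none
    rw [hr]
    by_cases h1 : 0 ≤ a1 ∧ a1 < 4
    · exact Or.inr (by intro x hx; fin_cases hx <;> omega)
    · exact Or.inl (by intro x hx; fin_cases hx <;> omega)

-- ===== VERDICT (by name: the statement is the Claim_ definition above) =====
theorem evansAmarginalA4_spec : Claim_equal_evansAmarginalA4 := by
  intro a0 a1 _
  unfold Spec_evansAmarginalA4
  exact evansAmarginalA4_eq a0 a1
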